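-- pv_equiv track=rewrite | github.com/mtp354/Quantum-Poker | Quantum Poker 1.01 .py | tensor_product
-- ===== SOURCE A (Python) =====
-- def tensor_product(list1, list2):
--     output = []
--     if not list1:
--         return list2
--     for item1 in list1:
--         for item2 in list2:
--             output.append([item1, item2])
--     for i in range(len(output)):
--         output[i] = sorted(flatten(output[i]))
--     return output
--
-- def flatten(list_of_lists):
--     if len(list_of_lists) == 0:
--         return list_of_lists
--     if isinstance(list_of_lists[0], list):
--         return flatten(list_of_lists[0]) + flatten(list_of_lists[1:])
--     return list_of_lists[:1] + flatten(list_of_lists[1:])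
-- ===== SOURCE B (Python) =====
-- def tensor_product(list1, list2):
--     if not list1:
--         return list2
--     sorted1 = [sorted(a) for a in list1]
--     sorted2 = [sorted(b) for b in list2]
--     output = []
--     for a in sorted1:
--         for b in sorted2:
--             # two-pointer merge of two already-sorted lists
--             i = j = 0
--             merged = []
--             while i < len(a) and j < len(b):
--                 if a[i] <= b[j]:
--                     merged.append(a[i]); i += 1
--                 else:
--                     merged.append(b[j]); j += 1
--             merged.extend(a[i:])
--             merged.extend(b[j:])
--             output.append(merged)
--     return output
-- ===== Notes on version B (the rewrite author's own statement) =====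
-- stated objective: faster
-- what changed: Each input list is sorted once up front and each pair is produced by a linear two-pointer merge of the two presorted lists, instead of flattening and re-sorting every pair.
import Mathlib
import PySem

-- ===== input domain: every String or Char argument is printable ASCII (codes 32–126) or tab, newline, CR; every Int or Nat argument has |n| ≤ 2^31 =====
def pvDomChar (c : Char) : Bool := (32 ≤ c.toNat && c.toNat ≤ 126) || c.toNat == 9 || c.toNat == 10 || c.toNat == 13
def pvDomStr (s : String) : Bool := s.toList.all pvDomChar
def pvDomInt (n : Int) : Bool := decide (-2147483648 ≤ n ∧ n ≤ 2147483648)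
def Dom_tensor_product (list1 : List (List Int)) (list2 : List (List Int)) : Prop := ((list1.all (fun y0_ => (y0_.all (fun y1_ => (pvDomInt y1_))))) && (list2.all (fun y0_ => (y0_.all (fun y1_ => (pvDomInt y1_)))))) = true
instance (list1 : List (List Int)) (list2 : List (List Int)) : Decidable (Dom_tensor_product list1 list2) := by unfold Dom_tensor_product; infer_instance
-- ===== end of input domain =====

-- B sorts each input list once and builds each pair by a linear two-pointer merge, instead of flattening and re-sorting every pair (objective: faster).

-- ===== PORT A =====
-- flatten specialised at the two types it is called at: List Int elements (isinstance false branch)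
def pvFlattenI : List Int → List Int
  | [] => []
  | x :: rest => [x] ++ pvFlattenI rest

-- flatten on a list whose elements are lists (isinstance true branch)
def pvFlattenLL : List (List Int) → List Int
  | [] => []
  | x :: rest => pvFlattenI x ++ pvFlattenLL rest

def tensor_product (list1 : List (List Int)) (list2 : List (List Int)) : List (List Int) :=
  if list1 = [] then list2
  else
    let output : List (List (List Int)) :=
      list1.foldl (fun acc item1 =>
        list2.foldl (fun acc2 item2 => acc2 ++ [[item1, item2]]) acc) []
    output.map (fun o => PySem.List.sorted (pvFlattenLL o) (fun x => x) false)

-- ===== PORT B =====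
-- two-pointer merge of two sorted lists (the while loop of Source B)
def pvMerge : List Int → List Int → List Int
  | [], ys => ys
  | x :: xs, [] => x :: xs
  | x :: xs, y :: ys =>
    if x ≤ y then x :: pvMerge xs (y :: ys) else y :: pvMerge (x :: xs) ys

def tensor_product_alt (list1 : List (List Int)) (list2 : List (List Int)) : List (List Int) :=
  if list1 = [] then list2
  else
    let sorted1 := list1.map (fun a => PySem.List.sorted a (fun x => x) false)
    let sorted2 := list2.map (fun b => PySem.List.sorted b (fun x => x) false)
    sorted1.flatMap (fun a => sorted2.map (fun b => pvMerge a b))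

-- ===== PRECONDITION & SPEC =====
def Spec_tensor_product (list1 : List (List Int)) (list2 : List (List Int)) (out : List (List Int)) : Prop := out = tensor_product_alt list1 list2
instance (list1 : List (List Int)) (list2 : List (List Int)) (out : List (List Int)) : Decidable (Spec_tensor_product list1 list2 out) := by unfold Spec_tensor_product; infer_instance

-- ===== CLAIM (what is proved, stated in full; the proofs are below) =====
def Claim_equal_tensor_product : Prop := ∀ (list1 : List (List Int)) (list2 : List (List Int)), Dom_tensor_product list1 list2 → Spec_tensor_product list1 list2 (tensor_product list1 list2)

-- ===== LEMMAS AND PROOFS =====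

theorem pvFlattenI_eq (xs : List Int) : pvFlattenI xs = xs := by
  induction xs with
  | nil => rfl
  | cons x xs ih => simp [pvFlattenI, ih]

theorem pvFlattenLL_pair (a b : List Int) : pvFlattenLL [a, b] = a ++ b := by
  simp [pvFlattenLL, pvFlattenI_eq]

theorem pvMerge_perm (xs ys : List Int) : (pvMerge xs ys).Perm (xs ++ ys) := by
  induction xs generalizing ys with
  | nil => simp [pvMerge]
  | cons x xs ihx =>
    induction ys with
    | nil => simp [pvMerge]
    | cons y ys ihy =>
      simp only [pvMerge]
      split
      · exact (ihx (y :: ys)).cons x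
      · exact (ihy.cons y).trans List.perm_middle.symm

theorem mem_pvMerge {z : Int} {xs ys : List Int} :
    z ∈ pvMerge xs ys ↔ z ∈ xs ∨ z ∈ ys := by
  rw [(pvMerge_perm xs ys).mem_iff]; simp

theorem pvMerge_pairwise {xs ys : List Int}
    (hx : xs.Pairwise (· ≤ ·)) (hy : ys.Pairwise (· ≤ ·)) :
    (pvMerge xs ys).Pairwise (· ≤ ·) := by
  induction xs generalizing ys with
  | nil => simpa [pvMerge]
  | cons x xs ihx =>
    induction ys with
    | nil => simpa [pvMerge, List.pairwise_cons] using hx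
    | cons y ys ihy =>
      rcases List.pairwise_cons.mp hx with ⟨hxall, hx'⟩
      rcases List.pairwise_cons.mp hy with ⟨hyall, hy'⟩
      simp only [pvMerge]
      split
      · rename_i hle
        refine List.pairwise_cons.mpr ⟨?_, ihx hx' hy⟩
        intro z hz
        rcases mem_pvMerge.mp hz with h | h
        · exact hxall z h
        · rcases List.mem_cons.mp h with rfl | h
          · exact hle
          · exact le_trans hle (hyall z h)
      · rename_i hlt
        push Not at hlt
        refine List.pairwise_cons.mpr ⟨?_, ihy hy'⟩
        intro z hz
        rcases mem_pvMerge.mp hz with h | h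
        · rcases List.mem_cons.mp h with rfl | h
          · exact le_of_lt hlt
          · exact le_trans (le_of_lt hlt) (hxall z h)
        · exact hyall z h

-- the key fact: sorting the concatenation equals merging the two sorted halves
theorem sorted_append_eq_merge (a b : List Int) :
    PySem.List.sorted (a ++ b) (fun x => x) false
      = pvMerge (PySem.List.sorted a (fun x => x) false) (PySem.List.sorted b (fun x => x) false) := by
  apply PySem.List.sorted_id_eq_of_perm_of_pairwise
  · exact (pvMerge_perm _ _).trans
      ((PySem.List.sorted_perm a (fun x => x) false).append
        (PySem.List.sorted_perm b (fun x => x) false))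
  · exact pvMerge_pairwise
      (by simpa using PySem.List.sorted_pairwise a (fun x => x))
      (by simpa using PySem.List.sorted_pairwise b (fun x => x))

-- ===== VERDICT (by name: the statement is the Claim_ definition above) =====
theorem tensor_product_spec : Claim_equal_tensor_product := by
  intro list1 list2 _
  unfold Spec_tensor_product tensor_product tensor_product_alt
  by_cases h : list1 = []
  · simp [h]
  · simp only [h, if_false]
    have hout : (list1.foldl (fun acc item1 =>
        list2.foldl (fun acc2 item2 => acc2 ++ [[item1, item2]]) acc) ([] : List (List (List Int))))
        = list1.flatMap (fun item1 => list2.map (fun item2 => [item1, item2])) := by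
      have hin : (fun (acc : List (List (List Int))) (item1 : List Int) =>
          list2.foldl (fun acc2 item2 => acc2 ++ [[item1, item2]]) acc)
          = fun acc item1 => acc ++ list2.map (fun item2 => [item1, item2]) := by
        funext acc item1
        exact PySem.List.foldl_append_singleton_eq_map (fun item2 => ([item1, item2] : List (List Int))) list2 acc
      rw [hin]
      simpa using PySem.List.foldl_append_eq_flatMap (fun item1 => list2.map (fun item2 => [item1, item2])) list1 []
    rw [hout]
    simp only [List.map_flatMap, List.flatMap_map, List.map_map, Function.comp_def]
    congr 1
    funext item1
    congr 1
    funext item2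
    rw [pvFlattenLL_pair, sorted_append_eq_merge]
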